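-- pv_equiv track=rewrite | github.com/OVerdadeiroPaulo/PL2025-A64459 | TPC2/TPC2.py | obras_por_periodo
-- ===== SOURCE A (Python) =====
-- def obras_por_periodo(dados):
--     dicionario = {}
--     for obra in dados:
--         periodo = obra['periodo']
--         nome_obra = obra['nome']
--         if periodo not in dicionario:
--             dicionario[periodo] = []
--         dicionario[periodo].append(nome_obra)
--
--     for periodo in dicionario:
--         dicionario[periodo].sort()
--     return dicionario
-- ===== SOURCE B (Python) =====
-- def obras_por_periodo(dados):
--     periodos = dict.fromkeys(obra['periodo'] for obra in dados)
--     return {p: sorted(obra['nome'] for obra in dados if obra['periodo'] == p)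
--             for p in periodos}
-- ===== Notes on version B (the rewrite author's own statement) =====
-- stated objective: simpler
-- what changed: Replaces the bucket-building loop over a mutated dict plus a second per-key in-place sort loop with an ordered dedup of the periods and a single dict comprehension building each group directly as sorted(filter).
import Mathlib
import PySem

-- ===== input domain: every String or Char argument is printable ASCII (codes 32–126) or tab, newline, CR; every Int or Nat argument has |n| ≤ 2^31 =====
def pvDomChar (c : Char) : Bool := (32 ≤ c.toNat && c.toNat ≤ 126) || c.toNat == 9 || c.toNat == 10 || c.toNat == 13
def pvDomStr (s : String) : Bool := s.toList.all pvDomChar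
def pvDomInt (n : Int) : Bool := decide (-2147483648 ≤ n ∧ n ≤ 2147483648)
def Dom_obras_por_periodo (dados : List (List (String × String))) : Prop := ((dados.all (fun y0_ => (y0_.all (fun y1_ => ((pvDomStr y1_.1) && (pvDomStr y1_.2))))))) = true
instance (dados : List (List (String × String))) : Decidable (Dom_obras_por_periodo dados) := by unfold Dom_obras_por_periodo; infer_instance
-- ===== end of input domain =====

-- B replaces A's mutate-a-dict bucketing loop + second per-key sort loop by an ordered dedup of the
-- periods and one dict comprehension building each group as sorted(filter); same cost, simpler shape.

-- obra[k] for an input dict (shared lookup helper of both ports; total form, used under Pre_)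
def pyLook (obra : List (String × String)) (k : String) : String :=
  ((PySem.Dict.mk obra).get? k).getD ""

-- ===== PORT A =====
def obras_por_periodo (dados : List (List (String × String))) : List (String × List String) :=
  let dicionario : PySem.Dict String (List String) :=
    dados.foldl (fun dicionario obra =>
      let periodo := pyLook obra "periodo"
      let nome_obra := pyLook obra "nome"
      let dicionario := if dicionario.contains periodo then dicionario
                        else dicionario.insert periodo []
      dicionario.insert periodo (dicionario.getD periodo [] ++ [nome_obra]))
      PySem.Dict.empty
  (dicionario.keys.foldl (fun (d : PySem.Dict String (List String)) periodo =>
      d.insert periodo (PySem.List.sorted (d.getD periodo []) (fun x => x) false)) dicionario).items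

-- ===== PORT B =====
def obras_por_periodo_alt (dados : List (List (String × String))) : List (String × List String) :=
  let periodos := PySem.List.dedup (dados.map (fun obra => pyLook obra "periodo"))
  periodos.map (fun p =>
    (p, PySem.List.sorted
          ((dados.filter (fun obra => pyLook obra "periodo" == p)).map
            (fun obra => pyLook obra "nome"))
          (fun x => x) false))

-- ===== PRECONDITION & SPEC =====
-- Pre_ excludes exactly the inputs on which the Python A raises KeyError: some work lacking a
-- 'periodo' or 'nome' key.
def Pre_obras_por_periodo (dados : List (List (String × String))) : Prop :=
  (dados.all (fun obra => obra.any (fun kv => kv.1 == "periodo") &&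
                          obra.any (fun kv => kv.1 == "nome"))) = true
instance (dados : List (List (String × String))) : Decidable (Pre_obras_por_periodo dados) := by
  unfold Pre_obras_por_periodo; infer_instance

def pvWitness_obras_por_periodo : (List (List (String × String))) :=
  ([[("periodo", "XX"), ("nome", "b")], [("nome", "a"), ("periodo", "XX")]])

def Spec_obras_por_periodo (dados : List (List (String × String))) (out : List (String × List String)) : Prop := out = obras_por_periodo_alt dados
instance (dados : List (List (String × String))) (out : List (String × List String)) : Decidable (Spec_obras_por_periodo dados out) := by unfold Spec_obras_por_periodo; infer_instance

-- ===== CLAIM (what is proved, stated in full; the proofs are below) =====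
def Claim_equal_obras_por_periodo : Prop := ∀ (dados : List (List (String × String))), Dom_obras_por_periodo dados → Pre_obras_por_periodo dados → Spec_obras_por_periodo dados (obras_por_periodo dados)

-- ===== LEMMAS AND PROOFS =====

-- A's loop body (ensure the key exists, then append the name) is Dict.modify with default [].
lemma stepA_eq_modify (d : PySem.Dict String (List String)) (obra : List (String × String)) :
    ((if d.contains (pyLook obra "periodo") then d
      else d.insert (pyLook obra "periodo") []).insert (pyLook obra "periodo")
       ((if d.contains (pyLook obra "periodo") then d
         else d.insert (pyLook obra "periodo") []).getD (pyLook obra "periodo") []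
        ++ [pyLook obra "nome"]))
    = d.modify (pyLook obra "periodo") [] (· ++ [pyLook obra "nome"]) := by
  by_cases h : d.contains (pyLook obra "periodo")
  · simp only [h, if_true, PySem.Dict.modify]
  · have h' : d.contains (pyLook obra "periodo") = false := by simpa using h
    simp only [h', Bool.false_eq_true, if_false, PySem.Dict.getD_insert_self,
      PySem.Dict.insert_insert_self, PySem.Dict.modify,
      PySem.Dict.getD_of_not_contains d [] h']

-- effect of A's second loop (sort each value in place) on a single lookup
lemma getD_sort_fold (ks : List String) (hk : ks.Nodup)
    (d : PySem.Dict String (List String)) (k : String) :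
    (ks.foldl (fun (d : PySem.Dict String (List String)) p =>
        d.insert p (PySem.List.sorted (d.getD p []) (fun x => x) false)) d).getD k []
    = if k ∈ ks then PySem.List.sorted (d.getD k []) (fun x => x) false else d.getD k [] := by
  induction ks generalizing d with
  | nil => simp
  | cons p ks ih =>
    rcases List.nodup_cons.mp hk with ⟨hp, hks⟩
    simp only [List.foldl_cons, ih hks]
    by_cases hkp : k = p
    · subst hkp
      simp [hp, PySem.Dict.getD_insert_self]
    · simp [List.mem_cons, hkp, PySem.Dict.getD_insert_of_ne _ _ _ hkp]

-- the grouped dict A builds, characterised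
lemma main_eq (dados : List (List (String × String))) :
    obras_por_periodo dados = obras_por_periodo_alt dados := by
  unfold obras_por_periodo obras_por_periodo_alt
  simp only [stepA_eq_modify]
  set keyf := fun obra : List (String × String) => pyLook obra "periodo" with hkeyf
  set nmf := fun obra : List (String × String) => pyLook obra "nome" with hnmf
  set D := dados.foldl (fun (d : PySem.Dict String (List String)) obra =>
      d.modify (keyf obra) [] (· ++ [nmf obra])) PySem.Dict.empty with hD
  have hkeys : D.keys = PySem.Set.ofList (dados.map keyf) := by
    rw [hD, PySem.Dict.keys_foldl_modify_key dados keyf [] (fun _ o v => v ++ [nmf o])]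
    simp [PySem.Set.update_nil_left]
  have hnodup : D.keys.Nodup := hkeys ▸ PySem.Set.nodup_ofList _
  have hget : ∀ p, D.getD p [] =
      (dados.filter (fun o => keyf o == p)).map nmf := by
    intro p
    have h := PySem.Dict.getD_foldl_modify_append
      (dados.map (fun o => (keyf o, nmf o))) PySem.Dict.empty p
    rw [List.foldl_map] at h
    rw [hD, h]
    simp [List.filter_map, Function.comp_def, List.map_map]
  have hkeysF : (D.keys.foldl (fun (d : PySem.Dict String (List String)) p =>
      d.insert p (PySem.List.sorted (d.getD p []) (fun x => x) false)) D).keys = D.keys := by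
    rw [PySem.Dict.keys_foldl_insert, PySem.Set.update_eq_append_filter,
      PySem.Set.ofList_eq_self_of_nodup D.keys hnodup]
    have : D.keys.filter (fun y => !PySem.Set.contains D.keys y) = [] := by
      apply List.filter_eq_nil_iff.mpr
      intro y hy
      simp [PySem.Set.contains_eq_listContains, hy]
    rw [this, List.append_nil]
  have hnodupF : (D.keys.foldl (fun (d : PySem.Dict String (List String)) p =>
      d.insert p (PySem.List.sorted (d.getD p []) (fun x => x) false)) D).keys.Nodup := by
    rw [hkeysF]; exact hnodup
  rw [PySem.Dict.items_eq_map_keys _ hnodupF [], hkeysF,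
    PySem.List.dedup_eq_ofList, ← hkeys]
  apply List.map_congr_left
  intro k hk
  rw [getD_sort_fold D.keys hnodup D k, if_pos hk, hget k]

-- ===== VERDICT (by name: the statement is the Claim_ definition above) =====
theorem obras_por_periodo_spec : Claim_equal_obras_por_periodo := by
  intro dados _ _
  unfold Spec_obras_por_periodo
  exact main_eq dados
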